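-- pv_equiv track=rewrite | github.com/praekelt/go-store-service | go_store_service/api_handler.py | create_urlspec_regex
-- ===== SOURCE A (Python) =====
-- def create_urlspec_regex(dfn, *args, **kw):
--     """
--     Create a URLSpec regex from a friendlier definition.
--
--     Friendlier definitions look like:
--
--       /foo/:var/baz/:other_var
--
--     Generated regular expresions look like::
--
--       /foo/(?P<var>[^/]*)/baz/(?P<other_var>[^/]*)
--     """
--     def replace_part(part):
--         if not part.startswith(':'):
--             return part
--         name = part.lstrip(":")
--         return "(?P<%s>[^/]*)" % (name,)
--
--     parts = dfn.split("/")
--     parts = [replace_part(p) for p in parts]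
--     return "/".join(parts)
-- ===== SOURCE B (Python) =====
-- def create_urlspec_regex(dfn, *args, **kw):
--     """
--     Create a URLSpec regex from a friendlier definition.
--
--     Single left-to-right scan over the string (no split/map/join):
--     a segment that starts with ':' (i.e. at the string start or right
--     after a '/') is emitted as a named group, everything else verbatim.
--     """
--     out = []
--     i, n = 0, len(dfn)
--     while True:
--         if i < n and dfn[i] == ':':
--             while i < n and dfn[i] == ':':
--                 i += 1
--             start = i
--             while i < n and dfn[i] != '/':
--                 i += 1
--             out.append("(?P<%s>[^/]*)" % dfn[start:i])
--         else:
--             start = i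
--             while i < n and dfn[i] != '/':
--                 i += 1
--             out.append(dfn[start:i])
--         if i == n:
--             break
--         out.append('/')
--         i += 1
--     return "".join(out)
-- ===== Notes on version B (the rewrite author's own statement) =====
-- stated objective: alternative
-- what changed: Replaces split('/') + list-map + '/'.join with a single left-to-right index scan that recognises ':'-initial segments in place and emits output as it goes.
import Mathlib
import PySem

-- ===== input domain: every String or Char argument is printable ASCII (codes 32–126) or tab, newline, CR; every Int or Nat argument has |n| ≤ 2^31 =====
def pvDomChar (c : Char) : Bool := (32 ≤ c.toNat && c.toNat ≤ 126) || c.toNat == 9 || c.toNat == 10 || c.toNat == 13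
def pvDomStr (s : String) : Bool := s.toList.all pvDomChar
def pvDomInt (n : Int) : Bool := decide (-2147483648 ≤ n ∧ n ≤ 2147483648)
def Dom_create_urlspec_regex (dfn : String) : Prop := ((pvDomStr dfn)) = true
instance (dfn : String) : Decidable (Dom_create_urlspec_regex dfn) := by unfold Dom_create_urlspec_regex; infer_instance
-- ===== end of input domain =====

-- B replaces A's split/map/join with a single left-to-right scan; same values, similar cost.

-- ===== PORT A =====
-- replace_part: lstrip(":") is a left strip of the single character ':' — ported exactly as dropWhile (· == ':')
def pvReplacePart (part : List Char) : List Char :=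
  if ¬ PySem.Chars.startswith part [':'] then part
  else
    let name := part.dropWhile (· == ':')
    "(?P<".toList ++ name ++ ">[^/]*)".toList

def create_urlspec_regex (dfn : String) : String :=
  let parts := PySem.Chars.splitOn dfn.toList "/".toList
  let parts := parts.map pvReplacePart
  String.ofList (PySem.Chars.join "/".toList parts)

-- ===== PORT B =====
def pvRender (name : List Char) : List Char :=
  "(?P<".toList ++ name ++ ">[^/]*)".toList

-- the scan of Source B: the inner while-loops collecting characters up to ':'-run end / next '/'
-- are the takeWhile/dropWhile pairs; the outer while-loop is the recursion
def pvAltGo (cs : List Char) : List Char :=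
  let t := cs.dropWhile (· == ':')
  let seg := if cs.head? = some ':' then pvRender (t.takeWhile (· != '/')) else cs.takeWhile (· != '/')
  match h : t.dropWhile (· != '/') with
  | '/' :: rest' => seg ++ '/' :: pvAltGo rest'
  | _ => seg
termination_by cs.length
decreasing_by
  have h1 : (t.dropWhile (· != '/')).length ≤ t.length := t.length_dropWhile_le _
  have h2 : t.length ≤ cs.length := cs.length_dropWhile_le _
  simp [h] at h1
  omega

def create_urlspec_regex_alt (dfn : String) : String :=
  String.ofList (pvAltGo dfn.toList)

-- ===== PRECONDITION & SPEC =====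
def Spec_create_urlspec_regex (dfn : String) (out : String) : Prop := out = create_urlspec_regex_alt dfn
instance (dfn : String) (out : String) : Decidable (Spec_create_urlspec_regex dfn out) := by unfold Spec_create_urlspec_regex; infer_instance

-- ===== CLAIM (what is proved, stated in full; the proofs are below) =====
def Claim_equal_create_urlspec_regex : Prop := ∀ (dfn : String), Dom_create_urlspec_regex dfn → Spec_create_urlspec_regex dfn (create_urlspec_regex dfn)

-- ===== LEMMAS AND PROOFS =====

def pvSplitSlash : List Char → List (List Char)
  | [] => [[]]
  | c :: rest =>
    if c = '/' then [] :: pvSplitSlash rest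
    else match pvSplitSlash rest with
         | s :: ss => (c :: s) :: ss
         | [] => [[c]]

def pvTailParts : List Char → List (List Char)
  | [] => []
  | _ :: r => pvSplitSlash r

theorem pvSplitSlash_eq (cs : List Char) :
    pvSplitSlash cs = cs.takeWhile (· != '/') :: pvTailParts (cs.dropWhile (· != '/')) := by
  induction cs with
  | nil => simp [pvSplitSlash, pvTailParts]
  | cons c rest ih =>
    by_cases hc : c = '/'
    · subst hc; simp [pvSplitSlash, pvTailParts]
    · simp [pvSplitSlash, hc, ih, bne]

def pvMapHead (f : List Char → List Char) : List (List Char) → List (List Char)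
  | [] => []
  | x :: xs => f x :: xs

theorem pvGo_eq (fuel : Nat) : ∀ (l cur : List Char) (acc : List (List Char)), l.length ≤ fuel →
    PySem.Chars.splitOn.go ['/'] fuel l cur acc =
      acc.reverse ++ pvMapHead (cur.reverse ++ ·) (pvSplitSlash l) := by
  induction fuel with
  | zero =>
    intro l cur acc hl
    have : l = [] := by cases l <;> simp_all
    subst this
    simp [PySem.Chars.splitOn.go, pvSplitSlash, pvMapHead]
  | succ f ih =>
    intro l cur acc hl
    cases l with
    | nil => simp [PySem.Chars.splitOn.go, pvSplitSlash, pvMapHead]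
    | cons c rest =>
      by_cases hc : c = '/'
      · subst hc
        rw [PySem.Chars.splitOn.go]
        simp only [List.isPrefixOf, BEq.rfl, Bool.true_and, if_pos, List.length_cons,
          List.length_nil, List.drop_succ_cons, List.drop_zero]
        rw [ih rest [] (List.reverse cur :: acc) (by simpa using Nat.le_of_succ_le_succ hl)]
        simp [pvSplitSlash, pvMapHead]
        split <;> simp_all
      · rw [PySem.Chars.splitOn.go]
        have hpre : ['/'].isPrefixOf (c :: rest) = false := by
          simp [List.isPrefixOf]; exact fun h => absurd h.symm hc
        simp only [hpre, Bool.false_eq_true, if_neg, Bool.not_eq_true]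
        rw [ih rest (c :: cur) acc (by simpa using Nat.le_of_succ_le_succ hl)]
        rw [pvSplitSlash_eq rest]
        simp [pvSplitSlash, hc, pvSplitSlash_eq rest, pvMapHead, bne]

theorem pvSplitOn_eq (l : List Char) : PySem.Chars.splitOn l ['/'] = pvSplitSlash l := by
  rw [PySem.Chars.splitOn, pvGo_eq (l.length + 1) l [] [] (by omega)]
  rw [pvSplitSlash_eq l]
  simp [pvMapHead]

theorem pvC1 (cs : List Char) :
    (cs.takeWhile (· != '/')).dropWhile (· == ':') =
      (cs.dropWhile (· == ':')).takeWhile (· != '/') := by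
  induction cs with
  | nil => simp
  | cons c rest ih =>
    by_cases hc : c = ':'
    · subst hc; simpa using ih
    · simp [List.takeWhile_cons, List.dropWhile_cons, hc]
      by_cases hs : c = '/' <;> simp [hs, hc]

theorem pvC2 (cs : List Char) :
    (cs.dropWhile (· == ':')).dropWhile (· != '/') = cs.dropWhile (· != '/') := by
  induction cs with
  | nil => simp
  | cons c rest ih =>
    by_cases hc : c = ':'
    · subst hc; simpa using ih
    · simp [List.dropWhile_cons, hc]

theorem pvDropWhile_head {p : Char → Bool} : ∀ (l : List Char) (x : Char) (xs : List Char),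
    l.dropWhile p = x :: xs → p x = false := by
  intro l
  induction l with
  | nil => intro x xs h; simp at h
  | cons c rest ih =>
    intro x xs h
    by_cases hc : p c
    · exact ih x xs (by simpa [List.dropWhile_cons, hc] using h)
    · rw [List.dropWhile_cons, if_neg (by simp [hc])] at h
      cases h; simpa using hc

theorem pvSeg_repl (cs : List Char) :
    pvReplacePart (cs.takeWhile (· != '/')) =
      if cs.head? = some ':' then pvRender ((cs.dropWhile (· == ':')).takeWhile (· != '/'))
      else cs.takeWhile (· != '/') := by
  cases cs with
  | nil => simp [pvReplacePart, PySem.Chars.startswith, List.isPrefixOf]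
  | cons c rest =>
    by_cases hc : c = ':'
    · subst hc
      rw [if_pos (by simp)]
      have hseg : ((':' :: rest).takeWhile (· != '/')) = ':' :: rest.takeWhile (· != '/') := by
        simp [List.takeWhile_cons]
      rw [hseg]
      rw [pvReplacePart]
      rw [if_neg (by simp [PySem.Chars.startswith, List.isPrefixOf])]
      rw [pvRender]
      have := pvC1 (':' :: rest)
      rw [hseg] at this
      simp only [List.dropWhile_cons] at this ⊢
      simp at this ⊢
      simpa using this
    · rw [if_neg (by simp [hc])]
      by_cases hs : c = '/'
      · subst hs
        simp [List.takeWhile_cons, pvReplacePart, PySem.Chars.startswith, List.isPrefixOf]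
      · have hseg : ((c :: rest).takeWhile (· != '/')) = c :: rest.takeWhile (· != '/') := by
          simp [List.takeWhile_cons, hs]
        rw [hseg, pvReplacePart, if_pos]
        simp [PySem.Chars.startswith, List.isPrefixOf]
        exact fun h => absurd h.symm hc

theorem pvM : ∀ (n : Nat) (cs : List Char), cs.length ≤ n →
    pvAltGo cs = PySem.Chars.join ['/'] ((pvSplitSlash cs).map pvReplacePart) := by
  intro n
  induction n with
  | zero =>
    intro cs h
    have : cs = [] := by cases cs <;> simp_all
    subst this
    rw [pvAltGo]
    simp [pvSplitSlash, PySem.Chars.join_singleton, pvReplacePart, PySem.Chars.startswith,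
      List.isPrefixOf]
  | succ n ih =>
    intro cs hlen
    rw [pvAltGo, pvSplitSlash_eq cs, List.map_cons]
    split
    · next rest' heq =>
      have hrest : cs.dropWhile (· != '/') = '/' :: rest' := by rw [← pvC2, heq]
      rw [hrest, pvTailParts]
      rw [pvSplitSlash_eq rest', List.map_cons, PySem.Chars.join_cons_cons, ← List.map_cons,
        ← pvSplitSlash_eq rest']
      have hr : rest'.length ≤ n := by
        have := cs.length_dropWhile_le (· != '/')
        rw [hrest] at this
        simp at this
        omega
      rw [ih rest' hr, ← pvSeg_repl]
      simp
    · next heq =>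
      have hx : (cs.dropWhile (· == ':')).dropWhile (· != '/') = [] := by
        cases h : (cs.dropWhile (· == ':')).dropWhile (· != '/') with
        | nil => rfl
        | cons c r =>
          have hc := pvDropWhile_head _ c r h
          simp at hc
          subst hc
          exact absurd h (by exact fun hh => heq r hh)
      have hrest : cs.dropWhile (· != '/') = [] := by rw [← pvC2, hx]
      rw [hrest, pvTailParts]
      simp only [List.map_nil, PySem.Chars.join_singleton]
      rw [← pvSeg_repl]

theorem pvMain (dfn : String) : create_urlspec_regex dfn = create_urlspec_regex_alt dfn := by
  rw [create_urlspec_regex, create_urlspec_regex_alt]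
  have hsep : ("/".toList) = ['/'] := rfl
  rw [hsep, pvSplitOn_eq, ← pvM dfn.toList.length dfn.toList (le_refl _)]

-- ===== VERDICT (by name: the statement is the Claim_ definition above) =====
theorem create_urlspec_regex_spec : Claim_equal_create_urlspec_regex := by
  intro dfn _
  exact pvMain dfn
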